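-- pv_equiv track=rewrite | github.com/ericmerle3789/Collatz-Junction-Theorem | research_log/R180_innovation.py | is_periodic_vector
-- ===== SOURCE A (Python) =====
-- def is_periodic_vector(positions, S):
--     """Check if the binary vector with 1s at 'positions' is periodic in {0,...,S-1}."""
--     pos_set = set(positions)
--     for p in range(1, S):
--         if S % p != 0:
--             continue
--         if p >= S:
--             break
--         shifted = set((pos + p) % S for pos in pos_set)
--         if shifted == pos_set:
--             return True, p
--     return False, None
-- ===== SOURCE B (Python) =====
-- def is_periodic_vector(positions, S):
--     """Check if the binary vector with 1s at 'positions' is periodic in {0,...,S-1}."""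
--     pos_set = set(positions)
--     divs = []
--     i = 1
--     while i * i <= S:
--         if S % i == 0:
--             if i < S:
--                 divs.append(i)
--             j = S // i
--             if j != i and j < S:
--                 divs.append(j)
--         i += 1
--     for p in sorted(divs):
--         shifted = set((pos + p) % S for pos in pos_set)
--         if shifted == pos_set:
--             return True, p
--     return False, None
-- ===== Notes on version B (the rewrite author's own statement) =====
-- stated objective: alternative
-- what changed: Instead of scanning every p in range(1,S) and testing divisibility, B enumerates the proper divisors of S by trial division up to sqrt(S) (collecting i and S//i), sorts them ascending and tests shift-invariance on that short list.
import Mathlib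
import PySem

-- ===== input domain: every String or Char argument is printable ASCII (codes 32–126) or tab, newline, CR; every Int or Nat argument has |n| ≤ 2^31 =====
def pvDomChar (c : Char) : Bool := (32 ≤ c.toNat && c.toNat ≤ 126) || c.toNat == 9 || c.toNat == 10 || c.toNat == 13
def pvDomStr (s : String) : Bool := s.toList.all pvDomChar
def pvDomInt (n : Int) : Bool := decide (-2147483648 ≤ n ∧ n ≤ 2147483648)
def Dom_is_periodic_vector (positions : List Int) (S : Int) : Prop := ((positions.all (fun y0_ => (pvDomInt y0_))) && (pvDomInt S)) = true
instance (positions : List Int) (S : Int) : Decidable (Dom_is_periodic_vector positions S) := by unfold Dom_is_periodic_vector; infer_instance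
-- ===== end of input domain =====

-- B replaces A's scan of all p in range(1, S) by enumerating the proper divisors of S
-- via trial division up to sqrt(S) and testing them in ascending order (objective: alternative).

-- ===== PORT A =====
-- shifted = set((pos + p) % S for pos in pos_set); shifted == pos_set   (shared loop body of both Pythons)
def ipvCheck (pos_set : List Int) (S p : Int) : Bool :=
  PySem.Set.equal (PySem.Set.ofList (pos_set.map (fun pos => PySem.Int.mod (pos + p) S))) pos_set

-- the 'for p in range(1, S)' loop of A, with continue / break / return
def ipvLoopA (pos_set : List Int) (S : Int) : List Int → Bool × Option Int
  | [] => (false, none)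
  | p :: rest =>
    if PySem.Int.mod S p ≠ 0 then ipvLoopA pos_set S rest
    else if p ≥ S then (false, none)
    else if ipvCheck pos_set S p then (true, some p)
    else ipvLoopA pos_set S rest

def is_periodic_vector (positions : List Int) (S : Int) : Bool × Option Int :=
  ipvLoopA (PySem.Set.ofList positions) S (PySem.List.pyRange 1 S 1)

-- ===== PORT B =====
-- the 'while i * i <= S' trial-division loop of B, collecting proper divisors i and S // i
def ipvDivs (S : Int) (i : Int) : List Int :=
  if _h : i * i ≤ S then
    (if PySem.Int.mod S i = 0 then
        (if i < S then [i] else []) ++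
        (if PySem.Int.floordiv S i ≠ i ∧ PySem.Int.floordiv S i < S then [PySem.Int.floordiv S i] else [])
      else []) ++ ipvDivs S (i + 1)
  else []
termination_by (S + 1 - i).toNat
decreasing_by
  have hiS : i ≤ S := by
    by_cases h0 : i ≤ 0
    · nlinarith
    · nlinarith
  omega

-- the 'for p in sorted(divs)' loop of B
def ipvLoopB (pos_set : List Int) (S : Int) : List Int → Bool × Option Int
  | [] => (false, none)
  | p :: rest =>
    if ipvCheck pos_set S p then (true, some p)
    else ipvLoopB pos_set S rest

def is_periodic_vector_alt (positions : List Int) (S : Int) : Bool × Option Int :=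
  ipvLoopB (PySem.Set.ofList positions) S
    (PySem.List.sorted (ipvDivs S 1) (fun x => x) false)

-- ===== PRECONDITION & SPEC =====
def Spec_is_periodic_vector (positions : List Int) (S : Int) (out : Bool × Option Int) : Prop := out = is_periodic_vector_alt positions S
instance (positions : List Int) (S : Int) (out : Bool × Option Int) : Decidable (Spec_is_periodic_vector positions S out) := by unfold Spec_is_periodic_vector; infer_instance

-- ===== CLAIM (what is proved, stated in full; the proofs are below) =====
def Claim_equal_is_periodic_vector : Prop := ∀ (positions : List Int) (S : Int), Dom_is_periodic_vector positions S → Spec_is_periodic_vector positions S (is_periodic_vector positions S)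

-- ===== LEMMAS AND PROOFS =====

-- A's loop, over a list of values all < S, is B's loop over the divisors kept by the filter
theorem ipvLoopA_eq_loopB_filter (ps : List Int) (S : Int) (l : List Int)
    (hl : ∀ p ∈ l, p < S) :
    ipvLoopA ps S l = ipvLoopB ps S (l.filter (fun p => PySem.Int.mod S p == 0)) := by
  induction l with
  | nil => rfl
  | cons p rest ih =>
    have hp : p < S := hl p (List.mem_cons_self ..)
    have hrest : ∀ q ∈ rest, q < S := fun q hq => hl q (List.mem_cons_of_mem _ hq)
    by_cases hm : PySem.Int.mod S p = 0
    · simp [ipvLoopA, ipvLoopB, hm, not_le.2 hp, ih hrest]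
    · simp [ipvLoopA, hm, ih hrest]

-- if S % d == 0 and 1 ≤ S // d then 0 < d  (S ≥ 1)
theorem ipv_pos_of_div (S d : Int) (hS : 1 ≤ S)
    (hm : PySem.Int.mod S d = 0) (hq : 1 ≤ PySem.Int.floordiv S d) : 0 < d := by
  rcases lt_trichotomy d 0 with hd | hd | hd
  · exfalso
    have h0 := PySem.Int.floordiv_mul_add_mod S d
    rw [hm] at h0
    nlinarith
  · subst hd
    simp [PySem.Int.floordiv] at hq
  · exact hd

-- S % d == 0 means (S // d) * d = S
theorem ipv_fd_mul (S d : Int) (hm : PySem.Int.mod S d = 0) :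
    PySem.Int.floordiv S d * d = S := by
  have h0 := PySem.Int.floordiv_mul_add_mod S d
  rw [hm] at h0
  linarith

-- the cofactor q = S // d of a positive divisor d is itself a positive divisor with S // q = d
theorem ipv_swap (S d : Int) (hS : 1 ≤ S) (hd : 0 < d) (hm : PySem.Int.mod S d = 0) :
    PySem.Int.mod S (PySem.Int.floordiv S d) = 0 ∧
    PySem.Int.floordiv S (PySem.Int.floordiv S d) = d ∧ 0 < PySem.Int.floordiv S d := by
  have hfd := ipv_fd_mul S d hm
  have hq : 0 < PySem.Int.floordiv S d := by nlinarith
  refine ⟨?_, ?_, hq⟩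
  · rw [PySem.Int.mod_eq_zero_iff_dvd]
    exact ⟨d, hfd.symm⟩
  · rw [PySem.Int.floordiv_eq_iff_of_pos hq]
    constructor <;> nlinarith

-- characterisation of what the trial-division loop started at i still collects
def ipvP (S i d : Int) : Prop :=
  PySem.Int.mod S d = 0 ∧ d < S ∧
    ((i ≤ d ∧ d * d ≤ S) ∨ (S < d * d ∧ i ≤ PySem.Int.floordiv S d))

-- membership in the trial-division accumulator
theorem ipv_mem_divs (d : Int) : ∀ (S i : Int), 1 ≤ i → (d ∈ ipvDivs S i ↔ ipvP S i d) := by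
  intro S i
  refine ipvDivs.induct S (fun i => 1 ≤ i → (d ∈ ipvDivs S i ↔ ipvP S i d)) ?_ ?_ i
  · intro i h ih hi
    have hS : 1 ≤ S := by nlinarith
    have ihx := ih (by omega)
    rw [ipvDivs]
    simp only [dif_pos h, List.mem_append]
    rw [ihx]
    by_cases hm : PySem.Int.mod S i = 0
    · have hfd := ipv_fd_mul S i hm
      have hswap := ipv_swap S i hS (by omega) hm
      have hile : i ≤ PySem.Int.floordiv S i := by nlinarith
      rw [if_pos hm]
      constructor
      · rintro (hc | hP)
        ·
          rcases List.mem_append.1 hc with hc | hc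
          · -- d = i
            have hd : d = i ∧ i < S := by
              by_cases hiS : i < S
              · simp [hiS] at hc
                exact ⟨hc, hiS⟩
              · simp [hiS] at hc
            exact ⟨hd.1 ▸ hm, hd.1 ▸ hd.2, Or.inl ⟨by omega, by rw [hd.1]; exact h⟩⟩
          · -- d = S // i
            have hd : d = PySem.Int.floordiv S i ∧ PySem.Int.floordiv S i ≠ i ∧
                PySem.Int.floordiv S i < S := by
              by_cases hc2 : PySem.Int.floordiv S i ≠ i ∧ PySem.Int.floordiv S i < S
              · simp [hc2] at hc
                exact ⟨hc, hc2.1, hc2.2⟩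
              · simp [hc2] at hc
            obtain ⟨hdq, hne, hqS⟩ := hd
            subst hdq
            refine ⟨hswap.1, hqS, Or.inr ⟨?_, by rw [hswap.2.1]⟩⟩
            have : i < PySem.Int.floordiv S i := lt_of_le_of_ne hile (Ne.symm hne)
            nlinarith
        · -- from the tail: weaken i+1 to i
          obtain ⟨h1, h2, h3⟩ := hP
          refine ⟨h1, h2, ?_⟩
          rcases h3 with ⟨a, b⟩ | ⟨a, b⟩
          · exact Or.inl ⟨by omega, b⟩
          · exact Or.inr ⟨a, by omega⟩
      · rintro ⟨h1, h2, h3⟩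
        rcases h3 with ⟨hid, hdd⟩ | ⟨hdd, hiq⟩
        · rcases eq_or_lt_of_le hid with heq | hlt
          · -- d = i: in the chunk
            left
            rw [List.mem_append]
            left
            have hiS : i < S := by omega
            simp [← heq, hiS]
          · right; exact ⟨h1, h2, Or.inl ⟨by omega, hdd⟩⟩
        · -- S < d*d, i ≤ S // d
          have hd0 : 0 < d := ipv_pos_of_div S d hS h1 (by omega)
          have hswd := ipv_swap S d hS hd0 h1
          rcases eq_or_lt_of_le hiq with heq | hlt
          · -- S // d = i, so d = S // i: in the chunk
            left
            rw [List.mem_append]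
            right
            have hdq : d = PySem.Int.floordiv S i := by rw [heq]; exact hswd.2.1.symm
            have hne : PySem.Int.floordiv S i ≠ i := by
              rw [← hdq]; intro hcon; rw [hcon] at hdd; nlinarith
            have hdi : d ≠ i := by
              intro hcon
              rw [hcon] at hdd
              nlinarith
            simp [← hdq, h2, hdi]
          · right; exact ⟨h1, h2, Or.inr ⟨hdd, by omega⟩⟩
    · rw [if_neg hm]
      simp only [List.not_mem_nil, false_or]
      constructor
      · rintro ⟨h1, h2, h3⟩
        refine ⟨h1, h2, ?_⟩
        rcases h3 with ⟨a, b⟩ | ⟨a, b⟩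
        · exact Or.inl ⟨by omega, b⟩
        · exact Or.inr ⟨a, by omega⟩
      · rintro ⟨h1, h2, h3⟩
        refine ⟨h1, h2, ?_⟩
        have hfd := ipv_fd_mul S d h1
        rcases h3 with ⟨a, b⟩ | ⟨a, b⟩
        · refine Or.inl ⟨?_, b⟩
          rcases eq_or_lt_of_le a with heq | hlt
          · exact absurd (by rw [heq]; exact h1) hm
          · omega
        · refine Or.inr ⟨a, ?_⟩
          rcases eq_or_lt_of_le b with heq | hlt
          · exact absurd ((PySem.Int.mod_eq_zero_iff_dvd S i).2 ⟨d, by rw [heq]; linarith⟩) hm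
          · omega
  · intro i h hi
    rw [ipvDivs]
    simp only [dif_neg h, List.not_mem_nil, false_iff]
    rintro ⟨h1, h2, ⟨hid, hdd⟩ | ⟨hdd, hiq⟩⟩
    · nlinarith
    · -- S < d*d and i ≤ S // d but i*i > S: impossible
      have hfd := ipv_fd_mul S d h1
      by_cases hS : 1 ≤ S
      · have hd0 : 0 < d := ipv_pos_of_div S d hS h1 (by omega)
        have h4 : i * d ≤ S := by nlinarith [mul_le_mul_of_nonneg_right hiq hd0.le]
        have h5 : d < i := by nlinarith
        nlinarith
      · -- S ≤ 0: then d < S ≤ 0 and (S//d)*d = S with S//d ≥ 1 forces S ≤ d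
        nlinarith

-- d ∈ ipvDivs S 1 ↔ d is a proper divisor of S
theorem ipv_mem_divs_one (S d : Int) :
    d ∈ ipvDivs S 1 ↔ (1 ≤ d ∧ d < S ∧ PySem.Int.mod S d = 0) := by
  rw [ipv_mem_divs d S 1 le_rfl]
  unfold ipvP
  constructor
  · rintro ⟨h1, h2, ⟨hid, hdd⟩ | ⟨hdd, hiq⟩⟩
    · exact ⟨hid, h2, h1⟩
    · have hfd := ipv_fd_mul S d h1
      have hS : 1 ≤ S := by nlinarith [ipv_fd_mul S d h1]
      exact ⟨ipv_pos_of_div S d hS h1 hiq, h2, h1⟩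
  · rintro ⟨h1, h2, h3⟩
    refine ⟨h3, h2, ?_⟩
    by_cases hdd : d * d ≤ S
    · exact Or.inl ⟨h1, hdd⟩
    · refine Or.inr ⟨by omega, ?_⟩
      have hfd := ipv_fd_mul S d h3
      nlinarith

-- the accumulator has no duplicates
theorem ipv_nodup_divs : ∀ (S i : Int), 1 ≤ i → (ipvDivs S i).Nodup := by
  intro S i
  refine ipvDivs.induct S (fun i => 1 ≤ i → (ipvDivs S i).Nodup) ?_ ?_ i
  · intro i h ih hi
    have hS : 1 ≤ S := by nlinarith
    have ihn := ih (by omega)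
    rw [ipvDivs]
    simp only [dif_pos h]
    by_cases hm : PySem.Int.mod S i = 0
    · have hswap := ipv_swap S i hS (by omega) hm
      have hfd := ipv_fd_mul S i hm
      have hile : i ≤ PySem.Int.floordiv S i := by nlinarith
      have hti : i ∉ ipvDivs S (i + 1) := by
        intro hd
        obtain ⟨h1, h2, h3⟩ := (ipv_mem_divs i S (i + 1) (by omega)).1 hd
        rcases h3 with ⟨a, _⟩ | ⟨a, _⟩
        · omega
        · nlinarith
      have htq : PySem.Int.floordiv S i ≠ i → PySem.Int.floordiv S i ∉ ipvDivs S (i + 1) := by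
        intro hne hd
        obtain ⟨h1, h2, h3⟩ := (ipv_mem_divs _ S (i + 1) (by omega)).1 hd
        have hlt : i < PySem.Int.floordiv S i := lt_of_le_of_ne hile (Ne.symm hne)
        rcases h3 with ⟨a, b⟩ | ⟨a, b⟩
        · nlinarith
        · rw [hswap.2.1] at b
          omega
      rw [if_pos hm]
      split_ifs with h1 h2 h2
      · simp [List.nodup_cons, ihn, hti, htq h2.1, Ne.symm h2.1]
      · simp [List.nodup_cons, ihn, hti]
      · simp [List.nodup_cons, ihn, htq h2.1]
      · simp [ihn]
    · simp [hm, ihn]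
  · intro i h hi
    rw [ipvDivs]
    simp [dif_neg h]

-- sorted divisors = the divisors of range(1, S), in order
theorem ipv_sorted_divs (S : Int) :
    PySem.List.sorted (ipvDivs S 1) (fun x => x) false
      = (PySem.List.pyRange 1 S 1).filter (fun p => PySem.Int.mod S p == 0) := by
  apply PySem.List.sorted_eq_of_perm_of_pairwise_lt
  · apply (List.perm_ext_iff_of_nodup
      (List.Nodup.filter _ (PySem.List.nodup_pyRange_one ..)) (ipv_nodup_divs S 1 le_rfl)).2
    intro a
    simp only [List.mem_filter, PySem.List.mem_pyRange_one, ipv_mem_divs_one, beq_iff_eq]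
    tauto
  · exact (PySem.List.pairwise_lt_pyRange_one 1 S).filter _

-- ===== VERDICT (by name: the statement is the Claim_ definition above) =====
theorem is_periodic_vector_spec : Claim_equal_is_periodic_vector := by
  intro positions S _
  unfold Spec_is_periodic_vector is_periodic_vector is_periodic_vector_alt
  rw [ipvLoopA_eq_loopB_filter _ _ _ (fun p hp => ((PySem.List.mem_pyRange_one).1 hp).2),
      ← ipv_sorted_divs]
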